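-- pv_equiv track=rewrite | github.com/fabnem12/squadro-bot | squadroGame/algoTournoi.py | appariementEasy
-- ===== SOURCE A (Python) =====
-- def appariementEasy(joueurs):
--     nbJoueurs = len(joueurs)
--
--     if nbJoueurs % 2 == 0:
--         match = lambda a, b: (joueurs[a], joueurs[b])
--
--         return [match(2*i, 2*i+1) for i in range(nbJoueurs // 2)], None
--     else:
--         appPair, _ = appariementEasy(joueurs[1:])
--         return appPair, joueurs[0]
-- ===== SOURCE B (Python) =====
-- def appariementEasy(joueurs):
--     if len(joueurs) % 2:
--         bye, rest = joueurs[0], joueurs[1:]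
--     else:
--         bye, rest = None, joueurs
--     it = iter(rest)
--     return list(zip(it, it)), bye
-- ===== Notes on version B (the rewrite author's own statement) =====
-- stated objective: idiomatic
-- what changed: Replaces A's index-arithmetic comprehension plus a recursive call for the odd case by stripping the bye up front and consuming the list two elements at a time with the zip(it, it) iterator idiom (no indices, no recursion).
import Mathlib
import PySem

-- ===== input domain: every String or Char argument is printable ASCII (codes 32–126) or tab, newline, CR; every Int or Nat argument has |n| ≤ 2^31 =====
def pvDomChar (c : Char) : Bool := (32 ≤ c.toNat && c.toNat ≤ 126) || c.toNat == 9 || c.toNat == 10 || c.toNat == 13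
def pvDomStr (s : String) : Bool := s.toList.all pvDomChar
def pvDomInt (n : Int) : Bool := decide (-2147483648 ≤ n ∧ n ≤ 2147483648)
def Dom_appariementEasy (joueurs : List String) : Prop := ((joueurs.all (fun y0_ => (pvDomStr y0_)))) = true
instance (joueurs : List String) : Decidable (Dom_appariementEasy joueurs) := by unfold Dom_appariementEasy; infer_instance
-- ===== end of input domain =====

-- B strips the odd bye up front and pairs the rest two-at-a-time (zip(it,it)); same O(n) cost, no indices or recursion.


-- ===== PORT A =====
-- A: if the length is even, pair joueurs[2i] with joueurs[2i+1] over range(n//2);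
--    else recurse on joueurs[1:] and return joueurs[0] as the bye.
def appariementEasy (joueurs : List String) : (List (String × String)) × Option String :=
  if h : PySem.Int.mod (joueurs.length : Int) 2 = 0 then
    (((PySem.List.pyRange 0 (PySem.Int.floordiv (joueurs.length : Int) 2) 1).map
        (fun i => (PySem.List.pyGetD joueurs (2*i) "", PySem.List.pyGetD joueurs (2*i + 1) ""))), none)
  else
    ((appariementEasy (PySem.List.slice joueurs (some 1) none)).1,
     some (PySem.List.pyGetD joueurs 0 ""))
termination_by joueurs.length
decreasing_by
  simp only [PySem.List.slice_from_one, List.length_tail]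
  have : joueurs.length ≠ 0 := by
    intro h0
    simp [h0, PySem.Int.mod] at h
  omega

-- ===== PORT B =====
-- list(zip(it, it)): consume the list two elements at a time
def zipPairs : List String → List (String × String)
  | a :: b :: t => (a, b) :: zipPairs t
  | _ => []

def appariementEasy_alt (joueurs : List String) : (List (String × String)) × Option String :=
  if PySem.Int.mod (joueurs.length : Int) 2 ≠ 0 then
    match joueurs with
    | [] => ([], none)          -- unreachable: an odd length is positive
    | j0 :: rest => (zipPairs rest, some j0)
  else
    (zipPairs joueurs, none)

-- ===== PRECONDITION & SPEC =====
def Spec_appariementEasy (joueurs : List String) (out : (List (String × String)) × Option String) : Prop := out = appariementEasy_alt joueurs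
instance (joueurs : List String) (out : (List (String × String)) × Option String) : Decidable (Spec_appariementEasy joueurs out) := by unfold Spec_appariementEasy; infer_instance

-- ===== CLAIM (what is proved, stated in full; the proofs are below) =====
def Claim_equal_appariementEasy : Prop := ∀ (joueurs : List String), Dom_appariementEasy joueurs → Spec_appariementEasy joueurs (appariementEasy joueurs)

-- ===== LEMMAS AND PROOFS =====

lemma mod2_natCast (n : Nat) : PySem.Int.mod (n : Int) 2 = ((n % 2 : Nat) : Int) := by
  exact_mod_cast PySem.Int.mod_natCast n 2

lemma floordiv2_natCast (n : Nat) : PySem.Int.floordiv (n : Int) 2 = ((n / 2 : Nat) : Int) := by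
  exact_mod_cast PySem.Int.floordiv_natCast n 2

lemma getD_cons2 (a b : String) (t : List String) (n : Nat) :
    (a :: b :: t).getD (n + 2) "" = t.getD n "" := by
  show (a :: b :: t).getD ((n + 1) + 1) "" = t.getD n ""
  rw [List.getD_cons_succ, List.getD_cons_succ]

-- A's comprehension over range(n//2) pairs l[2k] with l[2k+1]; on even-length lists this is zipPairs.
lemma map_range_pairs (m : Nat) (l : List String) (hm : l.length = 2 * m) :
    (List.range m).map
      (fun k => (PySem.List.pyGetD l (2 * Int.ofNat k) "", PySem.List.pyGetD l (2 * Int.ofNat k + 1) ""))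
      = zipPairs l := by
  induction m generalizing l with
  | zero =>
    cases l with
    | nil => simp [zipPairs]
    | cons a t => simp at hm
  | succ m ih =>
    match l, hm with
    | a :: b :: t, hm =>
      have ht : t.length = 2 * m := by simpa [Nat.mul_succ] using hm
      rw [List.range_succ_eq_map, List.map_cons, List.map_map]
      rw [show zipPairs (a :: b :: t) = (a, b) :: zipPairs t from rfl]
      congr 1
      · simp [pysem, Int.ofNat_eq_natCast]
      · rw [← ih t ht]
        apply List.map_congr_left
        intro k _
        simp only [Function.comp_apply, Nat.succ_eq_add_one, Int.ofNat_eq_natCast]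
        have e1 : (2 * (((k + 1 : Nat)) : Int)) = ((2 * k + 2 : Nat) : Int) := by push_cast; ring
        have e3 : (2 * ((k : Nat) : Int)) = ((2 * k : Nat) : Int) := by push_cast; ring
        rw [e1, e3]
        have e2 : ((2 * k + 2 : Nat) : Int) + 1 = ((2 * k + 3 : Nat) : Int) := by push_cast; ring
        have e4 : ((2 * k : Nat) : Int) + 1 = ((2 * k + 1 : Nat) : Int) := by push_cast; ring
        rw [e2, e4]
        simp only [PySem.List.pyGetD_natCast]
        rw [show 2 * k + 3 = (2 * k + 1) + 2 from by omega]
        rw [getD_cons2, getD_cons2]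

lemma appariementEasy_even (l : List String) (h : l.length % 2 = 0) :
    appariementEasy l = (zipPairs l, none) := by
  obtain ⟨m, hm⟩ : ∃ m, l.length = 2 * m := ⟨l.length / 2, by omega⟩
  have hmod : PySem.Int.mod (l.length : Int) 2 = 0 := by
    rw [mod2_natCast]; exact_mod_cast h
  rw [appariementEasy, dif_pos hmod]
  have hquot : PySem.Int.floordiv (l.length : Int) 2 = (m : Int) := by
    rw [floordiv2_natCast]; norm_cast; omega
  rw [hquot, PySem.List.pyRange_one]
  have h0 : ((m : Int) - 0).toNat = m := by omega
  rw [h0, List.map_map]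
  refine congrArg (fun x => (x, (none : Option String))) ?_
  rw [← map_range_pairs m l hm]
  apply List.map_congr_left
  intro k _
  simp [Int.ofNat_eq_natCast]

lemma appariementEasy_odd (j0 : String) (rest : List String)
    (h : (j0 :: rest).length % 2 ≠ 0) :
    appariementEasy (j0 :: rest) = (zipPairs rest, some j0) := by
  have hmod : PySem.Int.mod ((j0 :: rest).length : Int) 2 ≠ 0 := by
    rw [mod2_natCast]; exact_mod_cast h
  rw [appariementEasy, dif_neg hmod]
  have hrest : rest.length % 2 = 0 := by simp [List.length_cons] at h; omega
  simp only [PySem.List.slice_from_one, List.tail_cons]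
  rw [appariementEasy_even rest hrest]
  simp [pysem]

-- ===== VERDICT (by name: the statement is the Claim_ definition above) =====
theorem appariementEasy_spec : Claim_equal_appariementEasy := by
  intro joueurs _
  unfold Spec_appariementEasy appariementEasy_alt
  by_cases h : joueurs.length % 2 = 0
  · have hmod : PySem.Int.mod (joueurs.length : Int) 2 = 0 := by
      rw [mod2_natCast]; exact_mod_cast h
    rw [if_neg (by simpa using hmod)]
    exact appariementEasy_even joueurs h
  · have hmod : PySem.Int.mod (joueurs.length : Int) 2 ≠ 0 := by
      rw [mod2_natCast]; exact_mod_cast h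
    rw [if_pos (by simpa using hmod)]
    cases joueurs with
    | nil => simp at h
    | cons j0 rest => exact appariementEasy_odd j0 rest h
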